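-- pv_equiv track=rewrite | github.com/coleman7245/Portfolio | Python Scripts/AI Scripts/interativedeepening.py | convertRCToInt
-- ===== SOURCE A (Python) =====
-- def convertRCToInt(t):
--         row = int(t[0])
--         col = int(t[1])
--         num = 0
--         for i in range(row+1):
--             num += (i + 1)
--         num -= (row + 1 - col)
--         return num
-- ===== SOURCE B (Python) =====
-- def convertRCToInt(t):
--     row = int(t[0])
--     col = int(t[1])
--     n = row + 1
--     tri = n * (n + 1) // 2 if n > 0 else 0
--     return tri - (n - col)
-- ===== Notes on version B (the rewrite author's own statement) =====
-- stated objective: faster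
-- what changed: replaces the O(row) summation loop by the closed-form triangular number n*(n+1)//2 (guarded for non-positive n, where the loop body never runs)
import Mathlib
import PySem

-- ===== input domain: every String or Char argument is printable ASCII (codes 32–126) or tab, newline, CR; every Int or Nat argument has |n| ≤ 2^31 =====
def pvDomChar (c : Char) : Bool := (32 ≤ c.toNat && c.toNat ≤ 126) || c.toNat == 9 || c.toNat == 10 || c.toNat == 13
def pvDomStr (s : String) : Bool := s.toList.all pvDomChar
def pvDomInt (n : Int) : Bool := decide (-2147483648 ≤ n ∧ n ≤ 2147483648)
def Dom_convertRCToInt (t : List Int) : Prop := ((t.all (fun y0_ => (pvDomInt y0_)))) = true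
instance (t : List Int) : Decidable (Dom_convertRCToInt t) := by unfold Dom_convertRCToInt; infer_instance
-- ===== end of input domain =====

-- B replaces A's O(row) summation loop by the closed-form triangular number n*(n+1)//2 (O(1)).

-- ===== PORT A =====
-- literal port: row = t[0], col = t[1], loop 'for i in range(row+1): num += i+1', then num -= row+1-col
def convertRCToInt (t : List Int) : Int :=
  match PySem.List.pyGet? t 0, PySem.List.pyGet? t 1 with
  | some row, some col =>
      let num : Int := (PySem.List.pyRange 0 (row + 1) 1).foldl (fun num i => num + (i + 1)) 0
      num - (row + 1 - col)
  | _, _ => 0   -- unreachable under Pre_ (IndexError in Python)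

-- ===== PORT B =====
def convertRCToInt_alt (t : List Int) : Int :=
  match PySem.List.pyGet? t 0 with
  | none => 0   -- unreachable under Pre_
  | some row =>
    match PySem.List.pyGet? t 1 with
    | none => 0   -- unreachable under Pre_
    | some col =>
        let n := row + 1
        let tri : Int := if n > 0 then PySem.Int.floordiv (n * (n + 1)) 2 else 0
        tri - (n - col)

-- ===== PRECONDITION & SPEC =====
-- Pre_ excludes exactly the inputs where A raises IndexError: lists with fewer than 2 elements.
def Pre_convertRCToInt (t : List Int) : Prop := 2 ≤ t.length
instance (t : List Int) : Decidable (Pre_convertRCToInt t) := by unfold Pre_convertRCToInt; infer_instance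
def pvWitness_convertRCToInt : List Int := [3, 1]

def Spec_convertRCToInt (t : List Int) (out : Int) : Prop := out = convertRCToInt_alt t
instance (t : List Int) (out : Int) : Decidable (Spec_convertRCToInt t out) := by unfold Spec_convertRCToInt; infer_instance

-- ===== CLAIM (what is proved, stated in full; the proofs are below) =====
def Claim_equal_convertRCToInt : Prop := ∀ (t : List Int), Dom_convertRCToInt t → Pre_convertRCToInt t → Spec_convertRCToInt t (convertRCToInt t)

-- ===== LEMMAS AND PROOFS =====

-- twice the loop's value is m*(m+1)
lemma pv_two_loop (m : Nat) :
    (PySem.List.pyRange 0 (m : Int) 1).foldl (fun num i => num + (i + 1)) 0 * 2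
      = (m : Int) * (m + 1) := by
  induction m with
  | zero => simp [PySem.List.pyRange_one_eq_nil]
  | succ m ih =>
      rw [show ((m + 1 : Nat) : Int) = (m : Int) + 1 by push_cast; ring,
        PySem.List.pyRange_one_succ_right (by positivity), List.foldl_append]
      simp only [List.foldl_cons, List.foldl_nil]
      nlinarith [ih]

-- the loop's value in closed form
lemma pv_loop_closed (n : Int) :
    (PySem.List.pyRange 0 n 1).foldl (fun num i => num + (i + 1)) 0
      = if n > 0 then PySem.Int.floordiv (n * (n + 1)) 2 else 0 := by
  by_cases h : 0 < n
  · rw [if_pos h]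
    have hcast : ((n.toNat : Nat) : Int) = n := by omega
    have h2 := pv_two_loop n.toNat
    rw [hcast] at h2
    set F := (PySem.List.pyRange 0 n 1).foldl (fun num i => num + (i + 1)) 0 with hF
    rw [eq_comm, PySem.Int.floordiv_eq_iff_of_pos (by norm_num)]
    set K := n * (n + 1) with hK
    omega
  · rw [if_neg h, PySem.List.pyRange_one_eq_nil (by omega)]
    rfl

-- ===== VERDICT (by name: the statement is the Claim_ definition above) =====
theorem convertRCToInt_spec : Claim_equal_convertRCToInt := by
  intro t _hdom hpre
  unfold Spec_convertRCToInt convertRCToInt convertRCToInt_alt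
  match t, hpre with
  | a :: b :: rest, _ =>
    have h0 : PySem.List.pyGet? (a :: b :: rest) 0 = some a :=
      PySem.List.pyGet?_zero_cons a (b :: rest)
    have h1 : PySem.List.pyGet? (a :: b :: rest) 1 = some b := by
      show PySem.List.pyGet? (a :: b :: rest) ((1 : Nat) : Int) = some b
      rw [PySem.List.pyGet?_natCast]; rfl
    rw [h0, h1]
    simp only [pv_loop_closed]
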